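-- pv_equiv track=rewrite | github.com/hadxp/BDOGuildChatReader | main.py | format_guild_lines
-- ===== SOURCE A (Python) =====
-- from typing import Tuple, List, Optional
--
-- def format_guild_lines(items: List[str]) -> str:
--     """
--     Group items into lines starting with 'Guild'
--     """
--
--     lines = []
--     current = []
--     for t in items:
--         if t == "Guild" or t == "Gulld":
--             # start a new line
--             if current:
--                 lines.append(" ".join(current))
--             current = ["Guild"]
--         else:
--             current.append(t)
--     if current:
--         lines.append(" ".join(current))
--
--     # return one single string
--     return "\n".join(lines)
-- ===== SOURCE B (Python) =====
-- def format_guild_lines(items):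
--     """
--     Group items into lines starting with 'Guild'
--     """
--     MARKERS = ("Guild", "Gulld")
--
--     def scan(i):
--         # index of the first marker at position i or later
--         while i < len(items) and items[i] not in MARKERS:
--             i += 1
--         return i
--
--     lines = []
--     j = scan(0)
--     if j > 0:
--         lines.append(" ".join(items[0:j]))
--     while j < len(items):
--         k = scan(j + 1)
--         lines.append(" ".join(["Guild"] + items[j + 1:k]))
--         j = k
--     return "\n".join(lines)
-- ===== Notes on version B (the rewrite author's own statement) =====
-- stated objective: alternative
-- what changed: Replaces A's single fold carrying (lines, current-words) state with a final flush by an index-scanning segment decomposition: scan for each marker position and emit one line per marker-delimited slice.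
import Mathlib
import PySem

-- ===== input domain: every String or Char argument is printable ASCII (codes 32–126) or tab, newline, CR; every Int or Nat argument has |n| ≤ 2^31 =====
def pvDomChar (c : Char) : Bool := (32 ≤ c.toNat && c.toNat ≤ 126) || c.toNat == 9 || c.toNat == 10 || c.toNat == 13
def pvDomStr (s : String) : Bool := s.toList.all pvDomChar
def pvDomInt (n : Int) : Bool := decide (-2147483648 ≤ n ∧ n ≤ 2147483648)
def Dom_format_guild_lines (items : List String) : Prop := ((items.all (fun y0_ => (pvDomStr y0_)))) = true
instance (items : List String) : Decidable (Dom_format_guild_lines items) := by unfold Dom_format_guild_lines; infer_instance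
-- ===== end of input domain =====

-- B replaces A's fold over (lines, current) state by an index-scanning segment decomposition
-- (find each marker position, emit one line per marker-delimited slice); alternative structure, same cost.

-- ===== PORT A =====
def pvAStep (st : List String × List String) (t : String) : List String × List String :=
  if t == "Guild" || t == "Gulld" then
    ((if st.2 ≠ [] then st.1 ++ [PySem.Str.join " " st.2] else st.1), ["Guild"])
  else
    (st.1, st.2 ++ [t])

def format_guild_lines (items : List String) : String :=
  let st := items.foldl pvAStep ([], [])
  let lines := if st.2 ≠ [] then st.1 ++ [PySem.Str.join " " st.2] else st.1
  PySem.Str.join "\n" lines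

-- ===== PORT B =====
def pvIsMarker (t : String) : Bool := t == "Guild" || t == "Gulld"

-- Source B's scan: index of the first marker at position i or later
def pvScan (items : List String) (i : Nat) : Nat :=
  if h : i < items.length then
    if pvIsMarker items[i] then i else pvScan items (i + 1)
  else i
termination_by items.length - i

theorem pvScan_ge (items : List String) (i : Nat) : i ≤ pvScan items i := by
  unfold pvScan
  split
  · split
    · exact Nat.le_refl i
    · exact Nat.le_of_succ_le (pvScan_ge items (i + 1))
  · exact Nat.le_refl i
termination_by items.length - i

-- Source B's while-loop: one line per marker position (items[j] is a marker on entry)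
def pvGuildLines (items : List String) (j : Nat) : List String :=
  if j < items.length then
    let k := pvScan items (j + 1)
    PySem.Str.join " " ("Guild" :: PySem.List.slice items (some ((j : Int) + 1)) (some (k : Int))) ::
      pvGuildLines items k
  else []
termination_by items.length - j
decreasing_by
  have := pvScan_ge items (j + 1)
  omega

def format_guild_lines_alt (items : List String) : String :=
  let j := pvScan items 0
  let lines :=
    (if j > 0 then [PySem.Str.join " " (PySem.List.slice items (some 0) (some (j : Int)))] else []) ++
      pvGuildLines items j
  PySem.Str.join "\n" lines

-- ===== PRECONDITION & SPEC =====
def Spec_format_guild_lines (items : List String) (out : String) : Prop := out = format_guild_lines_alt items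
instance (items : List String) (out : String) : Decidable (Spec_format_guild_lines items out) := by unfold Spec_format_guild_lines; infer_instance

-- ===== CLAIM (what is proved, stated in full; the proofs are below) =====
def Claim_equal_format_guild_lines : Prop := ∀ (items : List String), Dom_format_guild_lines items → Spec_format_guild_lines items (format_guild_lines items)

-- ===== LEMMAS AND PROOFS =====

-- list-recursion restatement of B's scan loop, used only by the proofs
def pvSplitFirst : List String → List String × List String
  | [] => ([], [])
  | t :: rest =>
    if pvIsMarker t then ([], t :: rest)
    else
      let (h, r) := pvSplitFirst rest
      (t :: h, r)

theorem pvSplitFirst_snd_le (xs : List String) : (pvSplitFirst xs).2.length ≤ xs.length := by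
  induction xs with
  | nil => simp [pvSplitFirst]
  | cons t rest ih =>
    simp only [pvSplitFirst]
    split
    · simp
    · simpa using Nat.le_succ_of_le ih

theorem pvSplitFirst_append (xs : List String) :
    (pvSplitFirst xs).1 ++ (pvSplitFirst xs).2 = xs := by
  induction xs with
  | nil => simp [pvSplitFirst]
  | cons t rest ih =>
    simp only [pvSplitFirst]
    split
    · simp
    · simpa using ih

theorem pvSplitFirst_take (xs : List String) :
    xs.take (pvSplitFirst xs).1.length = (pvSplitFirst xs).1 := by
  rcases hp : pvSplitFirst xs with ⟨p, r⟩
  have hx : p ++ r = xs := by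
    have := pvSplitFirst_append xs
    rwa [hp] at this
  rw [← hx]
  simp

-- list-recursion restatement of B's while-loop
def pvGuildLoop : List String → List String
  | _ :: tl =>
    let p := pvSplitFirst tl
    PySem.Str.join " " ("Guild" :: p.1) :: pvGuildLoop p.2
  | [] => []
termination_by xs => xs.length
decreasing_by
  exact Nat.lt_succ_of_le (pvSplitFirst_snd_le tl)

-- A's final flush
def pvFinalize (st : List String × List String) : List String :=
  if st.2 ≠ [] then st.1 ++ [PySem.Str.join " " st.2] else st.1

-- characterization of A's fold by the segment recursion
theorem pvFold_char (items : List String) : ∀ (lines cur : List String),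
    pvFinalize (items.foldl pvAStep (lines, cur)) =
      lines ++ ((if cur ++ (pvSplitFirst items).1 ≠ [] then
                  [PySem.Str.join " " (cur ++ (pvSplitFirst items).1)] else []) ++
                pvGuildLoop (pvSplitFirst items).2) := by
  induction items with
  | nil =>
    intro lines cur
    simp only [List.foldl_nil, pvSplitFirst, pvFinalize, List.append_nil]
    split <;> simp_all [pvGuildLoop]
  | cons t ts ih =>
    intro lines cur
    simp only [List.foldl_cons, pvSplitFirst]
    by_cases hm : pvIsMarker t = true
    · have hm' : (t == "Guild" || t == "Gulld") = true := hm
      have hstep : pvAStep (lines, cur) t =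
        ((if cur ≠ [] then lines ++ [PySem.Str.join " " cur] else lines), ["Guild"]) := by
        simp [pvAStep, hm']
      rw [hstep, ih]
      simp only [hm, if_pos, pvGuildLoop]
      split <;> simp [*]
    · have hm' : (t == "Guild" || t == "Gulld") = false := by
        simp [pvIsMarker] at hm
        simp [hm.1, hm.2]
      have hstep : pvAStep (lines, cur) t = (lines, cur ++ [t]) := by
        simp [pvAStep, hm']
      rw [hstep, ih]
      simp only [hm]
      simp

-- the index scan computes the split of the dropped suffix
theorem pvScan_char (items : List String) (i : Nat) :
    pvScan items i = i + (pvSplitFirst (items.drop i)).1.length ∧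
      items.drop (pvScan items i) = (pvSplitFirst (items.drop i)).2 := by
  unfold pvScan
  split
  · rename_i h
    have hd : items.drop i = items[i] :: items.drop (i + 1) :=
      List.drop_eq_getElem_cons h
    split
    · rename_i hmk
      rw [hd]
      simp [pvSplitFirst, hmk]
    · rename_i hmk
      have ih := pvScan_char items (i + 1)
      rw [hd]
      simp only [pvSplitFirst, Bool.not_eq_true] at hmk ⊢
      rw [if_neg (by simp [hmk])]
      constructor
      · simpa [Nat.add_assoc, Nat.add_comm 1] using ih.1
      · simpa using ih.2
  · rename_i h
    have hd : items.drop i = [] := List.drop_eq_nil_of_le (by omega)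
    simp [hd, pvSplitFirst]
termination_by items.length - i

-- the index while-loop computes the list-recursion loop on the dropped suffix
theorem pvGuildLines_char (items : List String) (j : Nat) :
    pvGuildLines items j = pvGuildLoop (items.drop j) := by
  unfold pvGuildLines
  split
  · rename_i h
    have hd : items.drop j = items[j] :: items.drop (j + 1) :=
      List.drop_eq_getElem_cons h
    obtain ⟨hs1, hs2⟩ := pvScan_char items (j + 1)
    have hc : ((j : Int) + 1) = (((j + 1 : Nat) : Int)) := by push_cast; ring
    have hslice : PySem.List.slice items (some ((j : Int) + 1)) (some ((pvScan items (j + 1) : Nat) : Int)) =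
        (pvSplitFirst (items.drop (j + 1))).1 := by
      rw [hs1, hc, PySem.List.slice_natCast]
      simpa using pvSplitFirst_take (items.drop (j + 1))
    have ih := pvGuildLines_char items (pvScan items (j + 1))
    show PySem.Str.join " " ("Guild" ::
        PySem.List.slice items (some ((j : Int) + 1)) (some ((pvScan items (j + 1) : Nat) : Int))) ::
        pvGuildLines items (pvScan items (j + 1)) = pvGuildLoop (items.drop j)
    rw [hslice, ih, hs2, hd, pvGuildLoop]
  · rename_i h
    have hd : items.drop j = [] := List.drop_eq_nil_of_le (by omega)
    rw [hd, pvGuildLoop]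
termination_by items.length - j
decreasing_by
  have := pvScan_ge items (j + 1)
  omega

-- ===== VERDICT (by name: the statement is the Claim_ definition above) =====
theorem format_guild_lines_spec : Claim_equal_format_guild_lines := by
  intro items _
  show format_guild_lines items = format_guild_lines_alt items
  have ha : format_guild_lines items =
      PySem.Str.join "\n" (pvFinalize (items.foldl pvAStep ([], []))) := rfl
  have halt : format_guild_lines_alt items =
      PySem.Str.join "\n" ((if pvScan items 0 > 0 then
          [PySem.Str.join " " (PySem.List.slice items (some 0) (some ((pvScan items 0 : Nat) : Int)))]
        else []) ++ pvGuildLines items (pvScan items 0)) := rfl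
  have h := pvFold_char items [] []
  simp only [List.nil_append] at h
  obtain ⟨hs1, hs2⟩ := pvScan_char items 0
  simp only [Nat.zero_add, List.drop_zero] at hs1 hs2
  have hslice : PySem.List.slice items (some 0) (some ((pvScan items 0 : Nat) : Int)) =
      (pvSplitFirst items).1 := by
    have h0 : (some (0 : Int)) = (some ((0 : Nat) : Int)) := rfl
    rw [hs1, h0, PySem.List.slice_natCast]
    simpa using pvSplitFirst_take items
  rw [ha, halt, h, pvGuildLines_char items (pvScan items 0), hs2, hslice, hs1]
  congr 1
  rcases Decidable.em ((pvSplitFirst items).1 = []) with he | he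
  · simp [he]
  · simp [he, List.length_pos_iff_ne_nil.mpr he]
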